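-- pv_equiv track=rewrite | github.com/AdamZhouSE/pythonHomework | Code/CodeRecords/2121/60760/288170.py | func
-- ===== SOURCE A (Python) =====
-- def func(n:int):
--     if n>=0:
--         count=0
--         if n==0:
--             count=0
--         if n==1:
--             count=10
--         if n>=2:
--            temp=9
--            for i in range(n-1):
--                temp=temp*(9-i)
--            count=count+temp
--         return count+func(n-1)
--     return  0
-- ===== SOURCE B (Python) =====
-- def func(n: int):
--     # Sum over lengths k = 1..n of the number of k-digit strings with all
--     # distinct digits: 10 for k = 1, 9*9*8*...*(11-k) for 2 <= k <= 10,
--     # and 0 for k > 10 (only 10 digits exist), so the sum is constant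
--     # beyond n = 10.  One pass with a running product -- no recursion,
--     # no inner loop.
--     if n < 0:
--         return 0
--     total = 10 if n >= 1 else 0
--     p = 9
--     for k in range(2, min(n, 10) + 1):
--         p *= 11 - k
--         total += p
--     return total
-- ===== Notes on version B (the rewrite author's own statement) =====
-- stated objective: faster
-- what changed: A recomputes the distinct-digit count for each length with an inner loop inside an n-deep recursion (O(n^2)); B does one iterative pass keeping a running product and running sum, capped at length 10 where the count is provably 0, so it is O(1) with no recursion.
import Mathlib
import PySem

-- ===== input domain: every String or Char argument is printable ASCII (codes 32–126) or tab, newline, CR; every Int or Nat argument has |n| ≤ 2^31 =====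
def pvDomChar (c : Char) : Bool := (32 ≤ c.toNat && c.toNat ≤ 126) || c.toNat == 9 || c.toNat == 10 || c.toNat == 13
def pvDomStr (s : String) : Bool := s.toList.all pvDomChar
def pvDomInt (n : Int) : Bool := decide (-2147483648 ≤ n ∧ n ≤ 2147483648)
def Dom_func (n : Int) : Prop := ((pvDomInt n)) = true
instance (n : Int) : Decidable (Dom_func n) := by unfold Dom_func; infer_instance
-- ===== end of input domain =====

-- B replaces A's recursion-with-inner-loop (O(n^2)) by one pass with a running
-- product, capped at length 10 where the count of distinct-digit numbers is 0.

-- ===== PORT A =====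
def func (n : Int) : Int :=
  if _h : n ≥ 0 then
    let count : Int := 0
    let count := if n = 0 then (0 : Int) else count
    let count := if n = 1 then (10 : Int) else count
    let count :=
      if n ≥ 2 then
        count + (PySem.List.pyRange 0 (n - 1) 1).foldl (fun temp i => temp * (9 - i)) 9
      else count
    count + func (n - 1)
  else 0
termination_by (n + 1).toNat
decreasing_by omega

-- ===== PORT B =====
def func_alt (n : Int) : Int :=
  if n < 0 then 0
  else
    let total : Int := if n ≥ 1 then 10 else 0
    ((PySem.List.pyRange 2 (min n 10 + 1) 1).foldl
      (fun (s : Int × Int) k => (s.1 * (11 - k), s.2 + s.1 * (11 - k))) (9, total)).2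

-- ===== PRECONDITION & SPEC =====
def Spec_func (n : Int) (out : Int) : Prop := out = func_alt n
instance (n : Int) (out : Int) : Decidable (Spec_func n out) := by unfold Spec_func; infer_instance

-- ===== CLAIM (what is proved, stated in full; the proofs are below) =====
def Claim_equal_func : Prop := ∀ (n : Int), Dom_func n → Spec_func n (func n)

-- ===== LEMMAS AND PROOFS =====

-- A's inner loop: 9 * 9 * 8 * ... over range(k-1).
def prodA (k : Nat) : Int :=
  (PySem.List.pyRange 0 ((k : Int) - 1) 1).foldl (fun temp i => temp * (9 - i)) 9

-- the count A adds for length k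
def cnt (k : Nat) : Int := if k = 0 then 0 else if k = 1 then 10 else prodA k

-- the common spec: sum of cnt over lengths 1..m
def g : Nat → Int
  | 0 => 0
  | (m + 1) => g m + cnt (m + 1)

lemma func_neg (n : Int) (h : n < 0) : func n = 0 := by
  rw [func]; simp [not_le.mpr h]

lemma prodA_succ (K : Nat) (h : 1 ≤ K) : prodA (K + 1) = prodA K * (10 - (K : Int)) := by
  unfold prodA
  have h1 : (((K + 1 : Nat) : Int)) - 1 = ((K : Int) - 1) + 1 := by push_cast; ring
  rw [h1, PySem.List.pyRange_one_succ_right (by omega : (0 : Int) ≤ (K : Int) - 1),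
    List.foldl_append]
  simp only [List.foldl_cons, List.foldl_nil]
  ring

lemma foldl_mul_zero (l : List Int) : l.foldl (fun temp i => temp * (9 - i)) 0 = 0 := by
  induction l with
  | nil => rfl
  | cons a t ih => simpa using ih

lemma prodA_zero (k : Nat) (h : 11 ≤ k) : prodA k = 0 := by
  unfold prodA
  rw [PySem.List.pyRange_one_append 0 10 ((k : Int) - 1) (by omega) (by omega),
    List.foldl_append]
  have h10 : (PySem.List.pyRange 0 10 1).foldl (fun temp i => temp * (9 - i)) 9 = 0 := by
    decide
  rw [h10, foldl_mul_zero]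

lemma g_const (m : Nat) (h : 10 ≤ m) : g m = g 10 := by
  induction m with
  | zero => omega
  | succ k ih =>
    rcases Nat.lt_or_ge k 10 with hk | hk
    · have : k = 9 := by omega
      subst this; rfl
    · rw [g, cnt, if_neg (by omega), if_neg (by omega), prodA_zero _ (by omega), add_zero,
        ih hk]

lemma func_nat (m : Nat) : func (m : Int) = g m := by
  induction m with
  | zero =>
    rw [func]
    norm_num
    rw [func_neg _ (by norm_num)]
    rfl
  | succ k ih =>
    rw [func]
    rw [dif_pos (by push_cast; omega : ((k + 1 : Nat) : Int) ≥ 0)]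
    have hcast : (((k + 1 : Nat)) : Int) - 1 = (k : Int) := by push_cast; ring
    rw [hcast, ih]
    push_cast
    rcases Nat.eq_zero_or_pos k with hk | hk
    · subst hk; norm_num [g, cnt]
    · have h0 : ¬ ((k : Int) + 1 = 0) := by omega
      have h1 : ¬ ((k : Int) + 1 = 1) := by omega
      have h2 : (k : Int) + 1 ≥ 2 := by omega
      simp only [h0, h1, h2, if_false, if_true, zero_add]
      rw [g, cnt, if_neg (by omega), if_neg (by omega)]
      unfold prodA
      push_cast
      ring_nf

-- B's single pass over lengths 2..K, accumulating the running product and the sum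
lemma fold_eq (K : Nat) (hK : 1 ≤ K) (t : Int) :
    (PySem.List.pyRange 2 ((K : Int) + 1) 1).foldl
      (fun (s : Int × Int) k => (s.1 * (11 - k), s.2 + s.1 * (11 - k))) (9, t)
      = (prodA K, t + (g K - 10)) := by
  induction K with
  | zero => omega
  | succ k ih =>
    rcases Nat.eq_zero_or_pos k with hk | hk
    · subst hk
      norm_num
      constructor
      · unfold prodA
        rw [PySem.List.pyRange_one_eq_nil (by norm_num)]
        simp
      · simp [g, cnt]
    · push_cast
      rw [PySem.List.pyRange_one_succ_right (by omega : (2 : Int) ≤ (k : Int) + 1),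
        List.foldl_append]
      push_cast at ih
      rw [ih hk]
      have hc : cnt (k + 1) = prodA (k + 1) := by
        rw [cnt, if_neg (by omega), if_neg (by omega)]
      have hp := prodA_succ k hk
      simp only [List.foldl_cons, List.foldl_nil, g, hc, hp, Prod.mk.injEq]
      constructor <;> ring

lemma func_alt_nat (m : Nat) : func_alt (m : Int) = g m := by
  unfold func_alt
  rcases Nat.eq_zero_or_pos m with hm | hm
  · subst hm; decide
  · rw [if_neg (by omega), if_pos (by omega : (m : Int) ≥ 1)]
    rcases Nat.lt_or_ge 10 m with h10 | h10
    · have hmin : min (m : Int) 10 = ((10 : Nat) : Int) := by push_cast; omega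
      rw [hmin]
      simp only [fold_eq 10 (by omega) 10, g_const m (by omega)]
      ring
    · have hmin : min (m : Int) 10 = (m : Int) := by omega
      rw [hmin]
      simp only [fold_eq m hm 10]
      ring

-- ===== VERDICT (by name: the statement is the Claim_ definition above) =====
theorem func_spec : Claim_equal_func := by
  intro n _
  unfold Spec_func
  rcases Int.lt_or_le n 0 with h | h
  · rw [func_neg n h]
    unfold func_alt
    rw [if_pos h]
  · have hn : n = ((n.toNat : Nat) : Int) := by omega
    rw [hn, func_nat, func_alt_nat]
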